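-- pv_equiv track=rewrite | github.com/kimreeha/Algorithm | 프로그래머스/lv0/120899. 가장 큰 수 찾기/가장 큰 수 찾기.py | solution
-- ===== SOURCE A (Python) =====
-- def solution(array):
--     answer = []
--     ord_array = sorted(array)
--     answer.append(ord_array[-1])
--     for i in range(len(array)):
--         if array[i] == ord_array[-1]:
--             answer.append(i)
--     return answer
-- ===== SOURCE B (Python) =====
-- def solution(array):
--     # one state-maintaining pass instead of sort-then-rescan
--     m = array[0]
--     idxs = []
--     for i, x in enumerate(array):
--         if x > m:
--             m = x
--             idxs = [i]
--         elif x == m: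
--             idxs.append(i)
--     return [m] + idxs
-- ===== Notes on version B (the rewrite author's own statement) =====
-- stated objective: alternative
-- what changed: Replaces sort-then-rescan with one enumerate pass that maintains the running maximum and the list of its indices (reset on a new maximum, append on a tie).
import Mathlib
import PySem

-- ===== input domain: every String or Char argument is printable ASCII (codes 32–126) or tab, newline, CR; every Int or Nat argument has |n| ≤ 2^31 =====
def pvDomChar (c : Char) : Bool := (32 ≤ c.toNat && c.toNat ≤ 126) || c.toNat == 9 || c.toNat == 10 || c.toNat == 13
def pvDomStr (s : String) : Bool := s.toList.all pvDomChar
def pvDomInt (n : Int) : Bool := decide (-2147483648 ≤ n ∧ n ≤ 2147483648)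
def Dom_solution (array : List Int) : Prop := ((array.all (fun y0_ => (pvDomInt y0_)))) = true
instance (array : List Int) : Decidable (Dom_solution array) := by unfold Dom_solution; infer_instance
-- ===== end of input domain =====

-- B replaces A's sort-then-rescan by a single enumerate pass maintaining the running
-- maximum and its index list (alternative algorithm; equivalence of return values).


-- ===== PORT A =====
def solution (array : List Int) : List Int :=
  let ordArray := PySem.List.sorted array (fun x => x) false
  let answer : List Int := [PySem.List.pyGetD ordArray (-1) 0]
  (PySem.List.pyRange 0 (array.length : Int) 1).foldl
    (fun acc i =>
      if PySem.List.pyGetD array i 0 == PySem.List.pyGetD ordArray (-1) 0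
      then acc ++ [i] else acc) answer

-- ===== PORT B =====
def solStep : (Int × List Int) → (Int × Int) → (Int × List Int) :=
  fun s p =>
    if p.2 > s.1 then (p.2, [p.1])
    else if p.2 == s.1 then (s.1, s.2 ++ [p.1])
    else s

def solution_alt (array : List Int) : List Int :=
  match array with
  | [] => []   -- Python B raises IndexError here (array[0]); excluded by Pre_solution
  | a0 :: tl =>
    let r := (PySem.List.enumerate (a0 :: tl) 0).foldl solStep (a0, [])
    r.1 :: r.2

-- ===== PRECONDITION & SPEC =====
-- Pre_ excludes exactly the empty list, on which both Pythons raise IndexError.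
def Pre_solution (array : List Int) : Prop := array.isEmpty = false
instance (array : List Int) : Decidable (Pre_solution array) := by unfold Pre_solution; infer_instance
def pvWitness_solution : List Int := ([1, 3, 2, 3])
def Spec_solution (array : List Int) (out : List Int) : Prop := out = solution_alt array
instance (array : List Int) (out : List Int) : Decidable (Spec_solution array out) := by unfold Spec_solution; infer_instance

-- ===== CLAIM (what is proved, stated in full; the proofs are below) =====
def Claim_equal_solution : Prop := ∀ (array : List Int), Dom_solution array → Pre_solution array → Spec_solution array (solution array)

-- ===== LEMMAS AND PROOFS =====

-- running maximum of the second components, seeded with m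
def pvMax (m : Int) (l : List (Int × Int)) : Int :=
  l.foldl (fun b p => max b p.2) m

theorem pvMax_nil (m : Int) : pvMax m [] = m := rfl

theorem pvMax_cons (m : Int) (p : Int × Int) (l : List (Int × Int)) :
    pvMax m (p :: l) = pvMax (max m p.2) l := rfl

theorem le_pvMax (m : Int) (l : List (Int × Int)) : m ≤ pvMax m l := by
  induction l generalizing m with
  | nil => simp [pvMax_nil]
  | cons p t ih =>
    calc m ≤ max m p.2 := le_max_left _ _
    _ ≤ pvMax (max m p.2) t := ih _
    _ = pvMax m (p :: t) := (pvMax_cons m p t).symm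

theorem snd_le_pvMax (m : Int) (l : List (Int × Int)) :
    ∀ p ∈ l, p.2 ≤ pvMax m l := by
  induction l generalizing m with
  | nil => simp
  | cons q t ih =>
    intro p hp
    rcases List.mem_cons.mp hp with h | h
    · subst h
      rw [pvMax_cons]
      calc p.2 ≤ max m p.2 := le_max_right _ _
      _ ≤ pvMax (max m p.2) t := le_pvMax _ _
    · rw [pvMax_cons]; exact ih _ p h

theorem pvMax_mem (m : Int) (l : List (Int × Int)) :
    pvMax m l = m ∨ ∃ p ∈ l, pvMax m l = p.2 := by
  induction l generalizing m with
  | nil => left; rfl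
  | cons q t ih =>
    rw [pvMax_cons]
    rcases ih (max m q.2) with h | ⟨p, hp, he⟩
    · rcases max_choice m q.2 with hm | hm
      · left; rw [h, hm]
      · right; exact ⟨q, List.mem_cons_self, by rw [h, hm]⟩
    · right; exact ⟨p, List.mem_cons_of_mem _ hp, he⟩

-- characterization of B's fold
theorem foldB (l : List (Int × Int)) (m : Int) (acc : List Int) :
    l.foldl solStep (m, acc) =
      (pvMax m l,
       (if pvMax m l = m then acc else []) ++
         (l.filter (fun p => p.2 == pvMax m l)).map Prod.fst) := by
  induction l generalizing m acc with
  | nil => simp [pvMax_nil]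
  | cons q t ih =>
    obtain ⟨i, x⟩ := q
    rw [List.foldl_cons, pvMax_cons]
    by_cases hgt : x > m
    · have hmx : max m x = x := max_eq_right (le_of_lt hgt)
      rw [hmx]
      have hxle : x ≤ pvMax x t := le_pvMax x t
      have hMne : pvMax x t ≠ m := by omega
      simp only [solStep]
      rw [if_pos hgt, ih, if_neg hMne]
      by_cases hx : x = pvMax x t
      · simp [List.filter_cons, ← hx]
      · have hx' : pvMax x t ≠ x := fun h => hx h.symm
        simp [List.filter_cons, hx, hx']
    · have hle : x ≤ m := not_lt.mp hgt
      have hmx : max m x = m := max_eq_left hle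
      rw [hmx]
      by_cases heq : x = m
      · simp only [solStep]
        rw [if_neg hgt, if_pos (by simp [heq]), ih]
        by_cases hMm : pvMax m t = m
        · simp [List.filter_cons, hMm, heq]
        · have hxM : x ≠ pvMax m t := by rw [heq]; exact fun h => hMm h.symm
          simp [List.filter_cons, hMm, hxM]
      · simp only [solStep]
        rw [if_neg hgt, if_neg (by simp [heq]), ih]
        have hxM : x ≠ pvMax m t := by
          have := le_pvMax m t
          omega
        simp [List.filter_cons, hxM]

-- last element of a (≤)-pairwise list bounds every member
theorem le_getLast_of_pairwise (l : List Int) (h : l ≠ [])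
    (hp : l.Pairwise (· ≤ ·)) : ∀ y ∈ l, y ≤ l.getLast h := by
  induction l with
  | nil => simp at h
  | cons a t ih =>
    intro y hy
    rcases List.mem_cons.mp hy with rfl | hy
    · cases t with
      | nil => simp
      | cons b u =>
        have hgl : (b :: u).getLast (by simp) ∈ b :: u := List.getLast_mem _
        have hab : ∀ z ∈ b :: u, y ≤ z := (List.pairwise_cons.mp hp).1
        rw [List.getLast_cons (by simp)]
        exact hab _ hgl
    · cases t with
      | nil => simp at hy
      | cons b u =>
        rw [List.getLast_cons (by simp)]
        exact ih (by simp) (List.pairwise_cons.mp hp).2 y hy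

theorem solution_eq (a0 : Int) (tl : List Int) :
    solution (a0 :: tl) = solution_alt (a0 :: tl) := by
  set array := a0 :: tl with harr
  have hne : array ≠ [] := by simp [harr]
  -- the value A picks
  set ord := PySem.List.sorted array (fun x => x) false with hord
  have hordne : ord ≠ [] := by
    rw [hord, Ne, PySem.List.sorted_eq_nil_iff]; exact hne
  set L : Int := PySem.List.pyGetD ord (-1) 0 with hL
  have hLlast : L = ord.getLast hordne := PySem.List.pyGetD_neg_one ord 0 hordne
  have hLmem : L ∈ array := by
    rw [← PySem.List.mem_sorted array (fun x => x) false, ← hord, hLlast]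
    exact List.getLast_mem _
  have hLmax : ∀ y ∈ array, y ≤ L := by
    intro y hy
    rw [hLlast]
    exact le_getLast_of_pairwise ord hordne
      (PySem.List.sorted_pairwise array (fun x => x)) y
      ((PySem.List.mem_sorted array (fun x => x) false y).mpr hy)
  -- the value B picks
  set M : Int := pvMax a0 (PySem.List.enumerate array 0) with hM
  have hMmem : M ∈ array := by
    rcases pvMax_mem a0 (PySem.List.enumerate array 0) with h | ⟨p, hp, he⟩
    · rw [hM, h, harr]; exact List.mem_cons_self
    · rw [hM, he]
      rcases (PySem.List.mem_enumerate_iff array 0 p).mp hp with ⟨k, hk, hpk⟩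
      rw [hpk]
      exact List.getElem_mem hk
  have hMmax : ∀ y ∈ array, y ≤ M := by
    intro y hy
    rcases List.mem_iff_getElem.mp hy with ⟨k, hk, hky⟩
    have hp : ((0 : Int) + (k : Int), array[k]) ∈ PySem.List.enumerate array 0 :=
      (PySem.List.mem_enumerate_iff array 0 _).mpr ⟨k, hk, rfl⟩
    have := snd_le_pvMax a0 (PySem.List.enumerate array 0) _ hp
    rw [hM]; rw [← hky]; exact this
  have hLM : L = M := le_antisymm (hMmax L hLmem) (hLmax M hMmem)
  -- compute both sides
  have hB : solution_alt array =
      M :: ((PySem.List.enumerate array 0).filter (fun p => p.2 == M)).map Prod.fst := by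
    rw [harr]
    show ((PySem.List.enumerate (a0 :: tl) 0).foldl solStep (a0, [])).1 ::
         ((PySem.List.enumerate (a0 :: tl) 0).foldl solStep (a0, [])).2 = _
    rw [foldB]
    simp [← harr, ← hM]
  have hA : solution array =
      L :: (PySem.List.pyRange 0 (array.length : Int) 1).filter
        (fun i => PySem.List.pyGetD array i 0 == L) := by
    show (PySem.List.pyRange 0 (array.length : Int) 1).foldl
        (fun acc i => if PySem.List.pyGetD array i 0 == L then acc ++ [i] else acc) [L] = _
    rw [PySem.List.foldl_append_if_eq_filter (fun i => PySem.List.pyGetD array i 0 == L)]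
    rfl
  rw [hA, hB, hLM]
  congr 1
  rw [PySem.List.enumerate_eq_map_pyRange array 0, List.filter_map, List.map_map]
  have hlen : PySem.List.len array = (array.length : Int) := by
    simp [PySem.List.len]
  rw [hlen]
  simp [Function.comp_def]

-- ===== VERDICT (by name: the statement is the Claim_ definition above) =====
theorem solution_spec : Claim_equal_solution := by
  intro array _ hpre
  unfold Spec_solution
  cases array with
  | nil => simp [Pre_solution] at hpre
  | cons a0 tl => exact solution_eq a0 tl
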